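-- pv_equiv track=rewrite | github.com/nnkennard/mention_bottleneck | convert/conll_converter.py | build_parse_span_map
-- ===== SOURCE A (Python) =====
-- import collections
--
-- def split_parse_label(label):
--   curr_chunk = ""
--   chunks = []
--   for c in label:
--     if c in "()": # A chunk is everything up to a paren
--       if curr_chunk:
--         chunks.append(curr_chunk)
--       curr_chunk = c
--     else:
--       curr_chunk += c
--   chunks.append(curr_chunk)
--   return chunks
--
-- def build_parse_span_map(parse_col, offset):
--   span_starts = collections.defaultdict(list)
--   stack = []
--   label_map = {}
--   for i, orig_label in enumerate(parse_col):
--     labels = split_parse_label(orig_label) # Chunking around parens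
--     for label in labels:
--       if label.startswith("("): # Register start of a label
--         stack.insert(0, [label, i + offset]) # Goes on the top of the stack
--         # ^ build up label in [0], remember start (with offset) in [1]
--       elif label.endswith(")"): # End of chunk, hopefully start was registered
--         span_prefix, start_idx = stack.pop(0)
--         assert (span_prefix, i) not in label_map # This is an unclosed span
--         label_map[
--             (start_idx, i + offset)] = span_prefix + label # Label is suffix
--       else:
--         stack[0][0] += label # This is part of the label we're currently collecting
--
--   return label_map
-- ===== SOURCE B (Python) =====
-- def build_parse_span_map(parse_col, offset):
--   # Single char-scan per token: no separate chunk-splitting pass; stack top at the end.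
--   stack = []  # frames [label_so_far, start_idx]
--   label_map = {}
--   for i, tok in enumerate(parse_col):
--     n = len(tok)
--     j = 0
--     if n == 0 or tok[0] not in "()":
--       # leading continuation text ("" for an empty token) goes onto the current frame
--       k = j
--       while k < n and tok[k] not in "()":
--         k += 1
--       stack[-1][0] += tok[j:k]
--       j = k
--     while j < n:
--       c = tok[j]
--       k = j + 1
--       while k < n and tok[k] not in "()":
--         k += 1
--       if c == "(":
--         stack.append([tok[j:k], i + offset])
--       elif k == j + 1:  # the chunk is exactly ")": close the innermost open span
--         prefix, start_idx = stack.pop()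
--         label_map[(start_idx, i + offset)] = prefix + ")"
--       else:  # ")xyz": continuation text for the current frame
--         stack[-1][0] += tok[j:k]
--       j = k
--   return label_map
-- ===== Notes on version B (the rewrite author's own statement) =====
-- stated objective: alternative
-- what changed: B drops the separate split_parse_label chunk-list pass and instead scans each token's characters once in place, dispatching on '(' / lone ')' / continuation text directly while keeping the frame stack top at the list end (append/pop) instead of insert(0)/pop(0).
import Mathlib
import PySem

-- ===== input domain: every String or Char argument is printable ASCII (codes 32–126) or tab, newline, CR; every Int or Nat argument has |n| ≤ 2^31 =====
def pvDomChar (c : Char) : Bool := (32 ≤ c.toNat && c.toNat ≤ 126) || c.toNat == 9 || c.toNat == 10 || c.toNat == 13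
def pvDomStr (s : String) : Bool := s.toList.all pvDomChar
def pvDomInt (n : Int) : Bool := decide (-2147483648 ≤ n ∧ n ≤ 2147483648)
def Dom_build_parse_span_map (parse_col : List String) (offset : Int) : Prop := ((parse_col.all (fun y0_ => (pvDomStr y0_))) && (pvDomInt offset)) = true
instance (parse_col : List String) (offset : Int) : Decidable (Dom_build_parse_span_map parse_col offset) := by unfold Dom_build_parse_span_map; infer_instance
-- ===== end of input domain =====

-- B replaces A's separate split_parse_label chunking pass by a single in-place character scan
-- per token (objective: alternative decomposition; same asymptotic cost).
-- On inputs where the Python A raises IndexError (an empty frame stack when a continuation or a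
-- close arrives) both Pythons raise; those inputs are excluded by Pre_ and the ports' values
-- there are immaterial.

-- Shared state of both loops: the frame stack (label chars, start index) and the span map.
-- Labels are kept as List Char (the Python strings), converted to String only in the result.

def pvIsParen (c : Char) : Bool := c = '(' || c = ')'

-- ===== PORT A =====

-- split_parse_label: foldl over the characters with state (curr_chunk, chunks)
def pvSplitGo (st : List Char × List (List Char)) (c : Char) : List Char × List (List Char) :=
  if pvIsParen c then
    (if st.1 ≠ [] then ([c], st.2 ++ [st.1]) else ([c], st.2))
  else (st.1 ++ [c], st.2)

def split_parse_label (label : List Char) : List (List Char) :=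
  let st := label.foldl pvSplitGo ([], [])
  st.2 ++ [st.1]

-- one chunk of A's inner loop (the assert in A compares a string against int-pair keys and can
-- never fire in Python; it has no Lean counterpart)
def pvStepA (pos : Int) (st : List (List Char × Int) × PySem.Dict (Int × Int) (List Char))
    (label : List Char) : List (List Char × Int) × PySem.Dict (Int × Int) (List Char) :=
  if label.head? = some '(' then
    ((label, pos) :: st.1, st.2)                          -- stack.insert(0, [label, i+offset])
  else if label.getLast? = some ')' then
    match st.1 with
    | [] => st                                            -- Python: IndexError (pop from empty); excluded by Pre_
    | (lbl, start) :: rest => (rest, st.2.insert (start, pos) (lbl ++ label))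
  else
    match st.1 with
    | [] => st                                            -- Python: IndexError (stack[0] on empty); excluded by Pre_
    | (lbl, start) :: rest => ((lbl ++ label, start) :: rest, st.2)

-- for i, orig_label in enumerate(parse_col): inner loop over split_parse_label chunks
def pvLoopA (offset : Int) (i : Nat)
    (st : List (List Char × Int) × PySem.Dict (Int × Int) (List Char)) :
    List String → List (List Char × Int) × PySem.Dict (Int × Int) (List Char)
  | [] => st
  | tok :: rest =>
      pvLoopA offset (i + 1) ((split_parse_label tok.toList).foldl (pvStepA ((i : Int) + offset)) st) rest

def build_parse_span_map (parse_col : List String) (offset : Int) : List (Int × Int × String) :=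
  let fin := pvLoopA offset 0 ([], PySem.Dict.empty) parse_col
  fin.2.items.map (fun kv => (kv.1.1, kv.1.2, String.mk kv.2))

-- ===== PORT B =====
-- B's Python keeps the stack top at the END of the list (append/pop); the port keeps the top at
-- the head of the Lean list — the same LIFO discipline, push/pop/modify-top in the same order.

-- B's inner while loop: cs always starts with the paren character c of the current chunk;
-- the following non-paren run is the rest of the chunk (tok[j:k] in B).
def pvScanB (pos : Int) (st : List (List Char × Int) × PySem.Dict (Int × Int) (List Char))
    (cs : List Char) : List (List Char × Int) × PySem.Dict (Int × Int) (List Char) :=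
  match cs with
  | [] => st
  | c :: tail =>
      let run := tail.takeWhile (fun d => !(pvIsParen d))
      let st' :=
        if c = '(' then ((c :: run, pos) :: st.1, st.2)   -- stack.append([tok[j:k], i+offset])
        else if run = [] then                             -- the chunk is exactly ")": close
          match st.1 with
          | [] => st                                      -- Python: IndexError (pop from empty); excluded by Pre_
          | (lbl, start) :: r => (r, st.2.insert (start, pos) (lbl ++ [')']))
        else                                              -- ")xyz": continuation text
          match st.1 with
          | [] => st                                      -- Python: IndexError; excluded by Pre_
          | (lbl, start) :: r => ((lbl ++ c :: run, start) :: r, st.2)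
      pvScanB pos st' (tail.dropWhile (fun d => !(pvIsParen d)))
termination_by cs.length
decreasing_by simp only [List.length_cons]; exact Nat.lt_succ_of_le (List.length_dropWhile_le _ _)

-- B's per-token body: leading continuation text (or the empty token) first, then the paren scan
def pvTokB (pos : Int) (st : List (List Char × Int) × PySem.Dict (Int × Int) (List Char))
    (cs : List Char) : List (List Char × Int) × PySem.Dict (Int × Int) (List Char) :=
  match cs with
  | [] =>                                                 -- stack[-1][0] += ""
      (match st.1 with
       | [] => st                                         -- Python: IndexError; excluded by Pre_
       | (lbl, start) :: r => ((lbl ++ [], start) :: r, st.2))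
  | c :: _ =>
      if pvIsParen c then pvScanB pos st cs
      else
        let run := cs.takeWhile (fun d => !(pvIsParen d))
        let st' :=
          match st.1 with
          | [] => st                                      -- Python: IndexError; excluded by Pre_
          | (lbl, start) :: r => ((lbl ++ run, start) :: r, st.2)
        pvScanB pos st' (cs.dropWhile (fun d => !(pvIsParen d)))

def pvLoopB (offset : Int) (i : Nat)
    (st : List (List Char × Int) × PySem.Dict (Int × Int) (List Char)) :
    List String → List (List Char × Int) × PySem.Dict (Int × Int) (List Char)
  | [] => st
  | tok :: rest => pvLoopB offset (i + 1) (pvTokB ((i : Int) + offset) st tok.toList) rest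

def build_parse_span_map_alt (parse_col : List String) (offset : Int) : List (Int × Int × String) :=
  let fin := pvLoopB offset 0 ([], PySem.Dict.empty) parse_col
  fin.2.items.map (fun kv => (kv.1.1, kv.1.2, String.mk kv.2))

-- ===== PRECONDITION & SPEC =====
-- Pre_ excludes exactly the inputs on which the Python A raises IndexError: the parse column must
-- be "well nested" — the running count of open frames must be positive whenever continuation text
-- or a closing ")" arrives.  This is a pure depth-balance check (no labels, no map).

def pvDepthGo (d : Nat) : List Char → Option Nat
  | [] => some d
  | c :: t =>
      if c = '(' then pvDepthGo (d + 1) t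
      else if c = ')' then
        if d = 0 then none
        else
          match t.head? with
          | none => some (d - 1)                         -- ")" at end of token: pop
          | some e => pvDepthGo (if pvIsParen e then d - 1 else d) t
      else pvDepthGo d t                                 -- non-paren text inside the token: no effect

def pvTokPre (d : Nat) (cs : List Char) : Option Nat :=
  match cs with
  | [] => if d = 0 then none else some d                 -- empty token appends "" to the top frame
  | c :: _ =>
      if pvIsParen c then pvDepthGo d cs
      else if d = 0 then none                            -- leading continuation text needs an open frame
      else pvDepthGo d cs

def Pre_build_parse_span_map (parse_col : List String) (offset : Int) : Prop :=
  (parse_col.foldl (fun od tok => od.bind (fun d => pvTokPre d tok.toList)) (some 0)).isSome = true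

instance (parse_col : List String) (offset : Int) : Decidable (Pre_build_parse_span_map parse_col offset) := by
  unfold Pre_build_parse_span_map; infer_instance

def pvWitness_build_parse_span_map : List String × Int := (["(TOP(S(NP*", "*)", "(VP*", "*)))"], 3)

def Spec_build_parse_span_map (parse_col : List String) (offset : Int) (out : List (Int × Int × String)) : Prop := out = build_parse_span_map_alt parse_col offset
instance (parse_col : List String) (offset : Int) (out : List (Int × Int × String)) : Decidable (Spec_build_parse_span_map parse_col offset out) := by unfold Spec_build_parse_span_map; infer_instance

-- ===== CLAIM (what is proved, stated in full; the proofs are below) =====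
def Claim_equal_build_parse_span_map : Prop := ∀ (parse_col : List String) (offset : Int), Dom_build_parse_span_map parse_col offset → Pre_build_parse_span_map parse_col offset → Spec_build_parse_span_map parse_col offset (build_parse_span_map parse_col offset)

-- ===== LEMMAS AND PROOFS =====

-- Reference recursive form of split_parse_label (curr = the pending chunk)
def pvSplitRec (curr : List Char) : List Char → List (List Char)
  | [] => [curr]
  | c :: t =>
      if pvIsParen c then
        (if curr = [] then pvSplitRec [c] t else curr :: pvSplitRec [c] t)
      else pvSplitRec (curr ++ [c]) t

lemma pvSplit_foldl (cs : List Char) : ∀ (curr : List Char) (acc : List (List Char)),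
    (cs.foldl pvSplitGo (curr, acc)).2 ++ [(cs.foldl pvSplitGo (curr, acc)).1]
      = acc ++ pvSplitRec curr cs := by
  induction cs with
  | nil => intro curr acc; simp [pvSplitRec]
  | cons c t ih =>
      intro curr acc
      simp only [List.foldl_cons, pvSplitGo, pvSplitRec]
      by_cases hp : pvIsParen c = true
      · by_cases hc : curr = []
        · simp [hp, hc, ih]
        · simp [hp, hc, ih]
      · simp [hp, ih]

lemma pvSplit_eq (cs : List Char) : split_parse_label cs = pvSplitRec [] cs := by
  simpa using pvSplit_foldl cs [] []

lemma pvScanB_nil (pos : Int) (st : List (List Char × Int) × PySem.Dict (Int × Int) (List Char)) :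
    pvScanB pos st [] = st := by simp [pvScanB]

-- one chunk of B's scan equals A's per-chunk step
lemma pvScanB_step (pos : Int) (st : List (List Char × Int) × PySem.Dict (Int × Int) (List Char))
    (c : Char) (run0 rest : List Char) (hc : pvIsParen c = true)
    (hr : run0.all (fun x => !(pvIsParen x)) = true)
    (hrest : rest.takeWhile (fun x => !(pvIsParen x)) = []) :
    pvScanB pos st (c :: (run0 ++ rest)) = pvScanB pos (pvStepA pos st (c :: run0)) rest := by
  rw [pvScanB]
  have htake : (run0 ++ rest).takeWhile (fun x => !(pvIsParen x)) = run0 := by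
    rw [List.takeWhile_append]
    simp only [List.all_eq_true] at hr
    simp [List.takeWhile_eq_self_iff.mpr hr, hrest]
  have hdrop : (run0 ++ rest).dropWhile (fun x => !(pvIsParen x)) = rest := by
    rw [List.dropWhile_append]
    simp only [List.all_eq_true] at hr
    simp only [List.dropWhile_eq_nil_iff.mpr hr]
    cases rest with
    | nil => simp
    | cons r rs =>
        by_cases hrp : (!(pvIsParen r)) = true
        · simp [hrp] at hrest
        · simp [hrp]
  rw [htake, hdrop]
  congr 1
  -- the chunk dispatch
  by_cases h1 : c = '('
  · simp [pvStepA, h1]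
  · have hcr : c = ')' := by
      simp [pvIsParen, h1] at hc; exact hc
    subst hcr
    cases hrun : run0 with
    | nil => simp [pvStepA]
    | cons a as =>
        have hlast : (')' :: run0).getLast? ≠ some ')' := by
          subst hrun
          rw [List.getLast?_cons_cons]
          intro hcon
          have hm : ')' ∈ a :: as := List.mem_of_getLast? hcon
          have := (List.all_eq_true.mp hr) _ hm
          simp [pvIsParen] at this
        subst hrun
        simp only [pvStepA, List.head?_cons, Option.some.injEq]
        rw [if_neg (by simp), if_neg hlast]
        simp

lemma pvScan_eq (pos : Int) : ∀ (t run0 : List Char) (c : Char)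
    (st : List (List Char × Int) × PySem.Dict (Int × Int) (List Char)),
    pvIsParen c = true → run0.all (fun x => !(pvIsParen x)) = true →
    List.foldl (pvStepA pos) st (pvSplitRec (c :: run0) t) = pvScanB pos st (c :: (run0 ++ t)) := by
  intro t
  induction t with
  | nil =>
      intro run0 c st hc hr
      rw [pvSplitRec, List.foldl_cons, List.foldl_nil,
        show run0 ++ ([] : List Char) = run0 ++ [] from rfl,
        pvScanB_step pos st c run0 [] hc hr (by simp), pvScanB_nil]
  | cons d t2 ih =>
      intro run0 c st hc hr
      by_cases hd : pvIsParen d = true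
      · have : pvSplitRec (c :: run0) (d :: t2) = (c :: run0) :: pvSplitRec [d] t2 := by
          rw [pvSplitRec]; simp [hd]
        rw [this, List.foldl_cons, ih [] d _ hd (by simp),
          pvScanB_step pos st c run0 (d :: t2) hc hr (by simp [hd])]
        simp
      · have : pvSplitRec (c :: run0) (d :: t2) = pvSplitRec (c :: (run0 ++ [d])) t2 := by
          rw [pvSplitRec]; simp [hd]
        rw [this, ih (run0 ++ [d]) c st hc (by simp_all)]
        simp

-- continuation helper used only by the proofs
def pvCont (st : List (List Char × Int) × PySem.Dict (Int × Int) (List Char)) (l : List Char) :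
    List (List Char × Int) × PySem.Dict (Int × Int) (List Char) :=
  match st.1 with
  | [] => st
  | (lbl, start) :: r => ((lbl ++ l, start) :: r, st.2)

lemma pvStepA_cont (pos : Int) (st : List (List Char × Int) × PySem.Dict (Int × Int) (List Char))
    (l : List Char) (h : l.all (fun x => !(pvIsParen x)) = true) :
    pvStepA pos st l = pvCont st l := by
  have h1 : l.head? ≠ some '(' := by
    cases l with
    | nil => simp
    | cons a as =>
        have := (List.all_eq_true.mp h) a (by simp)
        simp only [List.head?_cons, ne_eq, Option.some.injEq]
        intro hcon; rw [hcon] at this; simp [pvIsParen] at this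
  have h2 : l.getLast? ≠ some ')' := by
    intro hcon
    have hm : ')' ∈ l := List.mem_of_getLast? hcon
    have := (List.all_eq_true.mp h) _ hm
    simp [pvIsParen] at this
  rw [pvStepA, if_neg h1, if_neg h2]
  rfl

lemma pvContPhase_eq (pos : Int) : ∀ (t run0 : List Char)
    (st : List (List Char × Int) × PySem.Dict (Int × Int) (List Char)),
    run0 ≠ [] → run0.all (fun x => !(pvIsParen x)) = true →
    List.foldl (pvStepA pos) st (pvSplitRec run0 t)
      = pvScanB pos (pvCont st (run0 ++ t.takeWhile (fun x => !(pvIsParen x))))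
          (t.dropWhile (fun x => !(pvIsParen x))) := by
  intro t
  induction t with
  | nil =>
      intro run0 st hne hr
      rw [pvSplitRec, List.foldl_cons, List.foldl_nil, pvStepA_cont pos st run0 hr]
      simp [pvScanB_nil]
  | cons d t2 ih =>
      intro run0 st hne hr
      by_cases hd : pvIsParen d = true
      · have : pvSplitRec run0 (d :: t2) = run0 :: pvSplitRec [d] t2 := by
          rw [pvSplitRec]; simp [hd, hne]
        rw [this, List.foldl_cons, pvStepA_cont pos st run0 hr,
          pvScan_eq pos t2 [] d _ hd (by simp)]
        simp [hd]
      · have : pvSplitRec run0 (d :: t2) = pvSplitRec (run0 ++ [d]) t2 := by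
          rw [pvSplitRec]; simp [hd]
        rw [this, ih (run0 ++ [d]) st (by simp) (by simp_all)]
        simp [hd]

lemma pvTok_eq (pos : Int) (cs : List Char)
    (st : List (List Char × Int) × PySem.Dict (Int × Int) (List Char)) :
    List.foldl (pvStepA pos) st (split_parse_label cs) = pvTokB pos st cs := by
  rw [pvSplit_eq]
  cases cs with
  | nil =>
      rw [pvSplitRec, List.foldl_cons, List.foldl_nil, pvStepA_cont pos st [] (by simp)]
      rw [pvTokB, pvCont]
  | cons c t =>
      by_cases hc : pvIsParen c = true
      · have : pvSplitRec [] (c :: t) = pvSplitRec [c] t := by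
          rw [pvSplitRec]; simp [hc]
        rw [this, pvScan_eq pos t [] c st hc (by simp)]
        simp [pvTokB, hc]
      · have : pvSplitRec [] (c :: t) = pvSplitRec [c] t := by
          rw [pvSplitRec]; simp [hc]
        rw [this, pvContPhase_eq pos t [c] st (by simp) (by simp [hc])]
        rw [pvTokB]
        
        simp [pvCont, hc]

lemma pvLoop_eq (offset : Int) : ∀ (l : List String) (i : Nat)
    (st : List (List Char × Int) × PySem.Dict (Int × Int) (List Char)),
    pvLoopA offset i st l = pvLoopB offset i st l := by
  intro l
  induction l with
  | nil => intro i st; rfl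
  | cons tok rest ih =>
      intro i st
      rw [pvLoopA, pvLoopB, pvTok_eq ((i : Int) + offset) tok.toList st, ih]

-- ===== VERDICT (by name: the statement is the Claim_ definition above) =====
theorem build_parse_span_map_spec : Claim_equal_build_parse_span_map := by
  intro parse_col offset _ _
  unfold Spec_build_parse_span_map build_parse_span_map build_parse_span_map_alt
  rw [pvLoop_eq]
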